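-- pv_equiv track=rewrite | github.com/juanjosegarciaripoll/py | py-agent/src/py_agent/proxy.py | _close_partial_json
-- ===== SOURCE A (Python) =====
-- def _close_partial_json(value: str) -> str:
--     stack: list[str] = []
--     in_string = False
--     escaped = False
--     for char in value:
--         if in_string:
--             if escaped:
--                 escaped = False
--             elif char == "\\":
--                 escaped = True
--             elif char == '"':
--                 in_string = False
--             continue
--         if char == '"':
--             in_string = True
--         elif char in "{[":
--             stack.append("}" if char == "{" else "]")
--         elif char in "}]" and stack and stack[-1] == char:
--             stack.pop()
--     if in_string:
--         value += '"'
--     return value + "".join(reversed(stack))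
-- ===== SOURCE B (Python) =====
-- def _close_partial_json(value: str) -> str:
--     # Staged passes: split on '"' into segments; a segment boundary quote is
--     # escaped iff the preceding segment ends in an odd run of backslashes.
--     segments = value.split('"')
--     structural = []
--     in_string = False
--     for seg in segments[:-1]:
--         if in_string:
--             trailing = len(seg) - len(seg.rstrip("\\"))
--             in_string = trailing % 2 != 0
--         else:
--             structural.append(seg)
--             in_string = True
--     if not in_string:
--         structural.append(segments[-1])
--     closers = []
--     for c in "".join(structural):
--         if c == "{":
--             closers.append("}")
--         elif c == "[":
--             closers.append("]")
--         elif c in "}]" and closers and closers[-1] == c: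
--             closers.pop()
--     return value + ('"' if in_string else "") + "".join(reversed(closers))
-- ===== Notes on version B (the rewrite author's own statement) =====
-- stated objective: alternative
-- what changed: Replaces A's single-pass character state machine (in_string/escaped flags with a bracket stack updated per char) by staged passes: split the input on the double-quote character into segments, classify each segment as inside/outside a string using the parity of the preceding segment's run of trailing backslashes, then run the bracket-matching fold only over the joined outside-string text.
import Mathlib
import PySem

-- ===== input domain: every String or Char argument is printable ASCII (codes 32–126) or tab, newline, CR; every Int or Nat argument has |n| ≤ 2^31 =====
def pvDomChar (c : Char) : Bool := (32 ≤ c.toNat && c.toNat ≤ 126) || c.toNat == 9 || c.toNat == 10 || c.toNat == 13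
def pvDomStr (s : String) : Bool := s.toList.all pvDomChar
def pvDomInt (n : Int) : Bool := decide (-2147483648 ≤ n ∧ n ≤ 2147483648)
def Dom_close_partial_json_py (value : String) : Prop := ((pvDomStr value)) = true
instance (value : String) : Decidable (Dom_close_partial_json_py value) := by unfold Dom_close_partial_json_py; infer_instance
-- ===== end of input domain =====

-- B replaces A's single-pass character state machine by staged passes: split on '"' into segments,
-- classify segments via trailing-backslash parity, then bracket-match over the outside-string text
-- only; same return value everywhere (alternative decomposition, no speed claim).

-- ===== PORT A =====
-- A's per-character state machine: state = (stack, in_string, escaped); Python appends the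
-- closer at the END of the list, checks stack[-1], pops the last, and joins reversed(stack).
def pvStepA (st : List Char × Bool × Bool) (c : Char) : List Char × Bool × Bool :=
  match st with
  | (stack, inStr, esc) =>
    if inStr then
      if esc then (stack, inStr, false)
      else if c = '\\' then (stack, inStr, true)
      else if c = '"' then (stack, false, esc)
      else (stack, inStr, esc)
    else
      if c = '"' then (stack, true, esc)
      else if c = '{' ∨ c = '[' then (stack ++ [if c = '{' then '}' else ']'], inStr, esc)
      else if (c = '}' ∨ c = ']') ∧ stack ≠ [] ∧ stack.getLast? = some c then
        (stack.dropLast, inStr, esc)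
      else (stack, inStr, esc)

def close_partial_json_py (value : String) : String :=
  let r := value.toList.foldl pvStepA ([], false, false)
  let value' := if r.2.1 then value ++ "\"" else value
  value' ++ String.ofList r.1.reverse

-- ===== PORT B =====
-- hand-port of Python's value.split('"') (single-char separator, empty segments kept)
def pvSplit : List Char → List (List Char)
  | [] => [[]]
  | c :: rest =>
    if c = '"' then [] :: pvSplit rest
    else (c :: (pvSplit rest).headD []) :: (pvSplit rest).tail

-- len(seg) - len(seg.rstrip("\\"))
def pvTrailBS (seg : List Char) : Nat :=
  seg.length - ((seg.reverse.dropWhile (· = '\\')).reverse).length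

-- Source B's loop over segments[:-1]: (in_string, structural) accumulator
def pvSegLoop : List (List Char) → Bool → List (List Char) → Bool × List (List Char)
  | [], inStr, acc => (inStr, acc)
  | seg :: rest, inStr, acc =>
    if inStr then pvSegLoop rest (decide (pvTrailBS seg % 2 ≠ 0)) acc
    else pvSegLoop rest true (acc ++ [seg])

-- Source B's second loop over the joined structural text
def pvBracketStep (closers : List Char) (c : Char) : List Char :=
  if c = '{' then closers ++ ['}']
  else if c = '[' then closers ++ [']']
  else if (c = '}' ∨ c = ']') ∧ closers ≠ [] ∧ closers.getLast? = some c then closers.dropLast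
  else closers

def close_partial_json_py_alt (value : String) : String :=
  let segs := pvSplit value.toList
  let r := pvSegLoop segs.dropLast false []
  let structural := if r.1 then r.2 else r.2 ++ [segs.getLastD []]
  let closers := structural.flatten.foldl pvBracketStep []
  value ++ (if r.1 then "\"" else "") ++ String.ofList closers.reverse

-- ===== PRECONDITION & SPEC =====
def Spec_close_partial_json_py (value : String) (out : String) : Prop := out = close_partial_json_py_alt value
instance (value : String) (out : String) : Decidable (Spec_close_partial_json_py value out) := by unfold Spec_close_partial_json_py; infer_instance

-- ===== CLAIM (what is proved, stated in full; the proofs are below) =====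
def Claim_equal_close_partial_json_py : Prop := ∀ (value : String), Dom_close_partial_json_py value → Spec_close_partial_json_py value (close_partial_json_py value)

-- ===== LEMMAS AND PROOFS =====

-- glue segments back with quotes: pvGlue (pvSplit l) = l
def pvGlue : List Char → List (List Char) → List Char
  | g, [] => g  -- unreachable for pvSplit results
  | _, [seg] => seg
  | g, seg :: rest => seg ++ '"' :: pvGlue g rest

-- A's escape flag inside a string, as a fold
def pvEscStep (e : Bool) (c : Char) : Bool := if e then false else c = '\\'

-- last-segment-uniform versions of pvSegLoop's outcome (proof-side helpers)
def pvFinAll : List (List Char) → Bool → Bool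
  | [], inStr => inStr
  | [_], inStr => inStr
  | seg :: rest, inStr =>
    if inStr then pvFinAll rest (decide (pvTrailBS seg % 2 ≠ 0)) else pvFinAll rest true

def pvStructAll : List (List Char) → Bool → List (List Char)
  | [], _ => []
  | [seg], inStr => if inStr then [] else [seg]
  | seg :: rest, inStr =>
    if inStr then pvStructAll rest (decide (pvTrailBS seg % 2 ≠ 0))
    else seg :: pvStructAll rest true

theorem pvSplit_ne_nil (l : List Char) : pvSplit l ≠ [] := by
  cases l with
  | nil => simp [pvSplit]
  | cons c rest => by_cases h : c = '"' <;> simp [pvSplit, h]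

theorem pvSplit_glue (l : List Char) : pvGlue [] (pvSplit l) = l := by
  induction l with
  | nil => simp [pvSplit, pvGlue]
  | cons c rest ih =>
    by_cases h : c = '"'
    · subst h
      simp only [pvSplit, if_pos rfl]
      cases hr : pvSplit rest with
      | nil => exact absurd hr (pvSplit_ne_nil rest)
      | cons s ss => rw [hr] at ih; simp [pvGlue, ih]
    · simp only [pvSplit, if_neg h]
      cases hr : pvSplit rest with
      | nil => exact absurd hr (pvSplit_ne_nil rest)
      | cons s ss =>
        rw [hr] at ih
        cases ss with
        | nil => simp_all [pvGlue]
        | cons s2 ss2 => simp_all [pvGlue]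

theorem pvSplit_noquote (l : List Char) : ∀ seg ∈ pvSplit l, '"' ∉ seg := by
  induction l with
  | nil => simp [pvSplit]
  | cons c rest ih =>
    by_cases h : c = '"'
    · simp only [pvSplit, if_pos h]
      intro seg hseg
      rcases List.mem_cons.mp hseg with h1 | h1
      · simp [h1]
      · exact ih seg h1
    · simp only [pvSplit, if_neg h]
      intro seg hseg
      cases hr : pvSplit rest with
      | nil => exact absurd hr (pvSplit_ne_nil rest)
      | cons s ss =>
        rw [hr] at hseg
        rcases List.mem_cons.mp hseg with h1 | h1
        · subst h1
          intro hmem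
          rcases List.mem_cons.mp hmem with h2 | h2
          · exact h h2.symm
          · exact ih s (by rw [hr]; exact List.mem_cons_self) h2
        · exact ih seg (by rw [hr]; exact List.mem_cons_of_mem s (by simpa using h1))

-- pointwise steps
theorem pvStepA_out (stack : List Char) (c : Char) (h : c ≠ '"') :
    pvStepA (stack, false, false) c = (pvBracketStep stack c, false, false) := by
  by_cases h1 : c = '{'
  · simp [pvStepA, pvBracketStep, h1]
  · by_cases h2 : c = '['
    · simp [pvStepA, pvBracketStep, h1, h2]
    · simp only [pvStepA, pvBracketStep, if_neg h, h1, h2]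
      simp [h1, h2]
      split <;> rfl

theorem pvStepA_in (stack : List Char) (e : Bool) (c : Char) (h : c ≠ '"') :
    pvStepA (stack, true, e) c = (stack, true, pvEscStep e c) := by
  cases e <;> simp [pvStepA, pvEscStep, h] <;> split <;> simp_all

-- fold lemmas over a quote-free segment
theorem foldA_out (seg : List Char) (h : '"' ∉ seg) (stack : List Char) :
    seg.foldl pvStepA (stack, false, false) = (seg.foldl pvBracketStep stack, false, false) := by
  induction seg generalizing stack with
  | nil => rfl
  | cons c rest ih =>
    have hc : c ≠ '"' := fun he => h (he ▸ List.mem_cons_self)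
    simp only [List.foldl_cons, pvStepA_out stack c hc]
    exact ih (fun hm => h (List.mem_cons_of_mem c hm)) _

theorem foldA_in (seg : List Char) (h : '"' ∉ seg) (stack : List Char) (e : Bool) :
    seg.foldl pvStepA (stack, true, e) = (stack, true, seg.foldl pvEscStep e) := by
  induction seg generalizing e with
  | nil => rfl
  | cons c rest ih =>
    have hc : c ≠ '"' := fun he => h (he ▸ List.mem_cons_self)
    simp only [List.foldl_cons, pvStepA_in stack e c hc]
    exact ih (fun hm => h (List.mem_cons_of_mem c hm)) _

theorem pvTrailBS_append (s : List Char) (c : Char) :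
    pvTrailBS (s ++ [c]) = if c = '\\' then pvTrailBS s + 1 else 0 := by
  have hrev : (s ++ [c]).reverse = c :: s.reverse := by simp
  by_cases h : c = '\\'
  · have hle : (s.reverse.dropWhile (· = '\\')).length ≤ s.length := by
      calc (s.reverse.dropWhile (· = '\\')).length ≤ s.reverse.length := List.length_dropWhile_le _ _
        _ = s.length := List.length_reverse
    have hd : (c :: s.reverse).dropWhile (· = '\\') = s.reverse.dropWhile (· = '\\') := by
      simp [List.dropWhile_cons, h]
    simp only [pvTrailBS, hrev, hd, if_pos h, List.length_reverse, List.length_append]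
    simp only [List.length_cons, List.length_nil]
    omega
  · have hd : (c :: s.reverse).dropWhile (· = '\\') = c :: s.reverse := by
      simp [List.dropWhile_cons, h]
    simp [pvTrailBS, hrev, hd, h]

theorem escFold_parity (seg : List Char) :
    seg.foldl pvEscStep false = decide (pvTrailBS seg % 2 ≠ 0) := by
  induction seg using List.reverseRecOn with
  | nil => simp [pvTrailBS]
  | append_singleton s c ih =>
    rw [List.foldl_append, List.foldl_cons, List.foldl_nil, pvTrailBS_append]
    by_cases h : c = '\\'
    · subst h
      rcases Nat.mod_two_eq_zero_or_one (pvTrailBS s) with hp | hp <;>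
        simp [pvEscStep, ih, hp, Nat.add_mod]
    · simp [pvEscStep, h]

-- main bridge: A's fold over the glued segments vs. the segment classification
theorem foldA_glue : ∀ (segs : List (List Char)), segs ≠ [] →
    (∀ seg ∈ segs, '"' ∉ seg) → ∀ (inStr : Bool) (stack : List Char),
    ∃ e, (pvGlue [] segs).foldl pvStepA (stack, inStr, false) =
      ((pvStructAll segs inStr).flatten.foldl pvBracketStep stack, pvFinAll segs inStr, e) := by
  intro segs
  induction segs with
  | nil => intro h; exact absurd rfl h
  | cons seg rest ih =>
    intro _ hq inStr stack
    have hseg : '"' ∉ seg := hq seg List.mem_cons_self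
    cases rest with
    | nil =>
      cases inStr with
      | false =>
        refine ⟨false, ?_⟩
        simp [pvGlue, pvStructAll, pvFinAll, foldA_out seg hseg stack]
      | true =>
        refine ⟨seg.foldl pvEscStep false, ?_⟩
        simp [pvGlue, pvStructAll, pvFinAll, foldA_in seg hseg stack false]
    | cons seg2 rest2 =>
      have hq' : ∀ s ∈ seg2 :: rest2, '"' ∉ s := fun s hs => hq s (List.mem_cons_of_mem seg hs)
      have hglue : pvGlue [] (seg :: seg2 :: rest2) = seg ++ '"' :: pvGlue [] (seg2 :: rest2) := by
        simp [pvGlue]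
      cases inStr with
      | false =>
        obtain ⟨e, he⟩ := ih (by simp) hq' true (seg.foldl pvBracketStep stack)
        refine ⟨e, ?_⟩
        rw [hglue, List.foldl_append, foldA_out seg hseg stack, List.foldl_cons]
        have hquote : pvStepA (seg.foldl pvBracketStep stack, false, false) '"'
            = (seg.foldl pvBracketStep stack, true, false) := by simp [pvStepA]
        rw [hquote, he]
        simp [pvStructAll, pvFinAll, List.foldl_append]
      | true =>
        rw [hglue, List.foldl_append, foldA_in seg hseg stack false, List.foldl_cons,
          escFold_parity]
        by_cases hp : pvTrailBS seg % 2 ≠ 0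
        · have hquote : pvStepA (stack, true, decide (pvTrailBS seg % 2 ≠ 0)) '"'
              = (stack, true, false) := by simp [pvStepA, hp]
          obtain ⟨e, he⟩ := ih (by simp) hq' true stack
          refine ⟨e, ?_⟩
          rw [hquote, he]
          simp [pvStructAll, pvFinAll, hp]
        · have hquote : pvStepA (stack, true, decide (pvTrailBS seg % 2 ≠ 0)) '"'
              = (stack, false, false) := by
            simp only [decide_eq_true_eq] at *
            simp [pvStepA, hp]
          obtain ⟨e, he⟩ := ih (by simp) hq' false stack
          refine ⟨e, ?_⟩
          rw [hquote, he]
          simp [pvStructAll, pvFinAll, hp]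

-- pvSegLoop accumulator lemma
theorem pvSegLoop_acc (segs : List (List Char)) : ∀ (inStr : Bool) (acc : List (List Char)),
    pvSegLoop segs inStr acc
      = ((pvSegLoop segs inStr []).1, acc ++ (pvSegLoop segs inStr []).2) := by
  induction segs with
  | nil => intro inStr acc; simp [pvSegLoop]
  | cons seg rest ih =>
    intro inStr acc
    cases inStr with
    | false =>
      simp only [pvSegLoop, Bool.false_eq_true, reduceIte]
      rw [ih true (acc ++ [seg]), ih true ([] ++ [seg])]
      simp
    | true =>
      simp only [pvSegLoop, if_pos rfl]
      exact ih _ acc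

-- pvStructAll/pvFinAll describe exactly Source B's dropLast loop plus last-segment handling
theorem segLoop_all (segs : List (List Char)) : segs ≠ [] → ∀ (inStr : Bool),
    pvFinAll segs inStr = (pvSegLoop segs.dropLast inStr []).1 ∧
    pvStructAll segs inStr = (pvSegLoop segs.dropLast inStr []).2 ++
      (if (pvSegLoop segs.dropLast inStr []).1 then [] else [segs.getLastD []]) := by
  induction segs with
  | nil => intro h; exact absurd rfl h
  | cons seg rest ih =>
    intro _ inStr
    cases rest with
    | nil =>
      cases inStr <;> simp [pvFinAll, pvStructAll, pvSegLoop]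
    | cons seg2 rest2 =>
      have hd : (seg :: seg2 :: rest2).dropLast = seg :: (seg2 :: rest2).dropLast := by
        simp [List.dropLast]
      cases inStr with
      | false =>
        have h1 := (ih (by simp) true).1
        have h2 := (ih (by simp) true).2
        rw [hd]
        simp only [pvFinAll, pvStructAll, Bool.false_eq_true, reduceIte, pvSegLoop]
        rw [pvSegLoop_acc _ true ([] ++ [seg])]
        constructor
        · exact h1
        · rw [h2]
          simp [List.append_assoc]
      | true =>
        have h1 := (ih (by simp) (decide (pvTrailBS seg % 2 ≠ 0))).1
        have h2 := (ih (by simp) (decide (pvTrailBS seg % 2 ≠ 0))).2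
        rw [hd]
        simp only [pvFinAll, pvStructAll, if_pos rfl, pvSegLoop]
        exact ⟨h1, by rw [h2]; simp⟩

-- ===== VERDICT (by name: the statement is the Claim_ definition above) =====
theorem close_partial_json_py_spec : Claim_equal_close_partial_json_py := by
  unfold Claim_equal_close_partial_json_py
  intro value _
  unfold Spec_close_partial_json_py close_partial_json_py close_partial_json_py_alt
  have hne := pvSplit_ne_nil value.toList
  have hq := pvSplit_noquote value.toList
  obtain ⟨e, he⟩ := foldA_glue (pvSplit value.toList) hne hq false []
  rw [pvSplit_glue value.toList] at he
  obtain ⟨hfin, hstruct⟩ := segLoop_all (pvSplit value.toList) hne false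
  rw [hstruct, hfin] at he
  rw [he]
  cases hin : (pvSegLoop (pvSplit value.toList).dropLast false []).1 <;>
    simp [hin, String.append_assoc, List.flatten_append, List.foldl_append]
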